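-- pv_equiv track=rewrite | github.com/shelabh/portfolio-agent-package | src/portfolio_agent/text_matching.py | term_variants
-- ===== SOURCE A (Python) =====
-- from typing import Iterable, List, Set
--
-- TERM_GROUPS = (
--     {"leadership", "lead", "led"},
--     {"mentor", "mentoring", "mentored"},
--     {"founder", "founders"},
--     {"prototype", "prototypes"},
--     {"engineer", "engineering"},
--     {"product", "products"},
-- )
--
-- def normalize_term(term: str) -> str:
--     token = term.lower().strip()
--     if token.endswith("ies") and len(token) > 4:
--         token = token[:-3] + "y"
--     elif token.endswith("ing") and len(token) > 5:
--         token = token[:-3]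
--     elif token.endswith("ed") and len(token) > 4:
--         token = token[:-2]
--     elif token.endswith("s") and len(token) > 4 and not token.endswith("ss"):
--         token = token[:-1]
--     return token
--
-- def term_variants(term: str) -> Set[str]:
--     normalized = normalize_term(term)
--     variants = {normalized}
--     for group in TERM_GROUPS:
--         group_normalized = {normalize_term(item) for item in group}
--         if normalized in group_normalized:
--             variants.update(group_normalized)
--     return variants
-- ===== SOURCE B (Python) =====
-- TERM_GROUPS = (
--     {"leadership", "lead", "led"},
--     {"mentor", "mentoring", "mentored"},
--     {"founder", "founders"},
--     {"prototype", "prototypes"},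
--     {"engineer", "engineering"},
--     {"product", "products"},
-- )
--
-- # Table-driven stemmer: first matching (suffix, minlen, replacement, blocked-suffix) rule wins.
-- _RULES = (("ies", 4, "y", None), ("ing", 5, "", None), ("ed", 4, "", None), ("s", 4, "", "ss"))
--
-- def normalize_term(term: str) -> str:
--     token = term.lower().strip()
--     for suffix, minlen, repl, blocked in _RULES:
--         if token.endswith(suffix) and len(token) > minlen and not (blocked and token.endswith(blocked)):
--             return token[:-len(suffix)] + repl
--     return token
--
-- # Precomputed once at import: normalized term -> union of normalized members of every group containing it.
-- INDEX = {}
-- for _group in TERM_GROUPS: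
--     _gn = frozenset(normalize_term(_item) for _item in _group)
--     for _m in _gn:
--         INDEX[_m] = INDEX.get(_m, frozenset()) | _gn
--
-- def term_variants(term: str):
--     normalized = normalize_term(term)
--     return {normalized} | INDEX.get(normalized, frozenset())
-- ===== Notes on version B (the rewrite author's own statement) =====
-- stated objective: idiomatic
-- what changed: B replaces A's if/elif stemmer with a table-driven suffix-rule loop and replaces A's per-call scan over TERM_GROUPS (re-normalizing every member each call) with a dict index precomputed once at module load mapping each normalized term to the union of its groups' normalized members, so each call is one normalize plus one lookup.
import Mathlib
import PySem

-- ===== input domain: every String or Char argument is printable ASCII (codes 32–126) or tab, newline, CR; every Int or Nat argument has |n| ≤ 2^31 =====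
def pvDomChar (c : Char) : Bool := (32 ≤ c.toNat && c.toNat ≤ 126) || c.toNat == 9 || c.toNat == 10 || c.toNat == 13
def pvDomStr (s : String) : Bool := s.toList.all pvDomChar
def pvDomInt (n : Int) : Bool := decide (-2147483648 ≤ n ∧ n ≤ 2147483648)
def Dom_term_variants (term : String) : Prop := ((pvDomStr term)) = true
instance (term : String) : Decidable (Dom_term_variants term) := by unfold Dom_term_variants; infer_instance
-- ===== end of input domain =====

-- B is more idiomatic: a table-driven stemmer plus a dict index precomputed once at module load
-- (normalized term -> union of its groups' normalized members), so each call is one lookup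
-- instead of A's per-call scan that re-normalizes every member of every group.

-- ===== PORT A =====
-- A's normalize_term: the if/elif chain, verbatim
def normalizeChars (cs : List Char) : List Char :=
  let token := PySem.Chars.strip (PySem.Chars.lower cs)
  if PySem.Chars.endswith token "ies".toList && decide (token.length > 4) then
    PySem.Chars.slice token none (some (-3)) ++ ['y']
  else if PySem.Chars.endswith token "ing".toList && decide (token.length > 5) then
    PySem.Chars.slice token none (some (-3))
  else if PySem.Chars.endswith token "ed".toList && decide (token.length > 4) then
    PySem.Chars.slice token none (some (-2))
  else if PySem.Chars.endswith token "s".toList && decide (token.length > 4)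
      && !PySem.Chars.endswith token "ss".toList then
    PySem.Chars.slice token none (some (-1))
  else token

def normalizeTermA (term : String) : String := String.ofList (normalizeChars term.toList)

-- TERM_GROUPS (Python set literals; set-valued results are compared as sets)
def pvGroups : List (List String) :=
  [["leadership","lead","led"],["mentor","mentoring","mentored"],["founder","founders"],
   ["prototype","prototypes"],["engineer","engineering"],["product","products"]]

def term_variants (term : String) : List String :=
  let normalized := normalizeTermA term
  pvGroups.foldl (fun variants group =>
    let groupNormalized : PySem.Set String := PySem.Set.ofList (group.map normalizeTermA)
    if groupNormalized.contains normalized then PySem.Set.update variants groupNormalized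
    else variants)
    (PySem.Set.add PySem.Set.empty normalized)

-- ===== PORT B =====
-- B's _RULES: (suffix, minimum length, replacement, blocking suffix)
def pvRules : List (List Char × Nat × List Char × Option (List Char)) :=
  [("ies".toList, 4, "y".toList, none), ("ing".toList, 5, [], none),
   ("ed".toList, 4, [], none), ("s".toList, 4, [], some "ss".toList)]

-- B's rule loop: first matching rule rewrites the suffix and returns
def applyRules : List (List Char × Nat × List Char × Option (List Char)) → List Char → List Char
  | [], token => token
  | (suffix, minlen, repl, blocked) :: rest, token =>
    if PySem.Chars.endswith token suffix && decide (token.length > minlen)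
        && !(match blocked with
             | none => false
             | some b => PySem.Chars.endswith token b) then
      PySem.Chars.slice token none (some (-(suffix.length : Int))) ++ repl
    else applyRules rest token

def normalizeTermB (term : String) : String :=
  String.ofList (applyRules pvRules (PySem.Chars.strip (PySem.Chars.lower term.toList)))

def pvGroupsB : List (List String) :=
  [["leadership","lead","led"],["mentor","mentoring","mentored"],["founder","founders"],
   ["prototype","prototypes"],["engineer","engineering"],["product","products"]]

-- INDEX, built once at module load: INDEX[m] = INDEX.get(m, frozenset()) | gn
def pvIndexB : PySem.Dict String (PySem.Set String) :=
  pvGroupsB.foldl (fun idx group =>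
    let gn : PySem.Set String := PySem.Set.ofList (group.map normalizeTermB)
    gn.foldl (fun idx m =>
      idx.insert m (PySem.Set.union (idx.getD m PySem.Set.empty) gn)) idx)
    PySem.Dict.empty

def term_variants_alt (term : String) : List String :=
  let normalized := normalizeTermB term
  PySem.Set.union (PySem.Set.add PySem.Set.empty normalized)
    (pvIndexB.getD normalized PySem.Set.empty)

-- ===== PRECONDITION & SPEC =====
def Spec_term_variants (term : String) (out : List String) : Prop := out = term_variants_alt term
instance (term : String) (out : List String) : Decidable (Spec_term_variants term out) := by unfold Spec_term_variants; infer_instance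

-- ===== CLAIM (what is proved, stated in full; the proofs are below) =====
def Claim_equal_term_variants : Prop := ∀ (term : String), Dom_term_variants term → Spec_term_variants term (term_variants term)

-- ===== LEMMAS AND PROOFS =====

-- B's table-driven stemmer computes exactly A's if/elif chain
theorem pvNormalize_eq (term : String) : normalizeTermB term = normalizeTermA term := by
  unfold normalizeTermB normalizeTermA normalizeChars pvRules
  simp [applyRules]

-- pvIndexB evaluated to its literal value
def pvIndexLit : PySem.Dict String (PySem.Set String) := PySem.Dict.mk
  [("leadership", ["leadership", "lead", "led"]), ("lead", ["leadership", "lead", "led"]),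
   ("led", ["leadership", "lead", "led"]), ("mentor", ["mentor"]), ("founder", ["founder"]),
   ("prototype", ["prototype"]), ("engineer", ["engineer"]), ("product", ["product"])]

theorem pvIndexB_eq : pvIndexB = pvIndexLit := by decide

-- both ports depend on the input only through the normalized term: the bodies agree for every n
theorem pv_core_eq (n : String) :
    pvGroups.foldl (fun variants group =>
      let groupNormalized : PySem.Set String := PySem.Set.ofList (group.map normalizeTermA)
      if groupNormalized.contains n then PySem.Set.update variants groupNormalized
      else variants)
      (PySem.Set.add PySem.Set.empty n)
    = PySem.Set.union (PySem.Set.add PySem.Set.empty n) (pvIndexB.getD n PySem.Set.empty) := by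
  rw [pvIndexB_eq]
  by_cases h1 : n = "leadership"; · subst h1; decide
  by_cases h2 : n = "lead"; · subst h2; decide
  by_cases h3 : n = "led"; · subst h3; decide
  by_cases h4 : n = "mentor"; · subst h4; decide
  by_cases h5 : n = "founder"; · subst h5; decide
  by_cases h6 : n = "prototype"; · subst h6; decide
  by_cases h7 : n = "engineer"; · subst h7; decide
  by_cases h8 : n = "product"; · subst h8; decide
  -- generic case: n matches no group, both sides are {n}
  have e1 : ["leadership","lead","led"].map normalizeTermA = ["leadership","lead","led"] := by decide
  have e2 : ["mentor","mentoring","mentored"].map normalizeTermA = ["mentor","mentor","mentor"] := by decide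
  have e3 : ["founder","founders"].map normalizeTermA = ["founder","founder"] := by decide
  have e4 : ["prototype","prototypes"].map normalizeTermA = ["prototype","prototype"] := by decide
  have e5 : ["engineer","engineering"].map normalizeTermA = ["engineer","engineer"] := by decide
  have e6 : ["product","products"].map normalizeTermA = ["product","product"] := by decide
  have b1 : (("leadership":String) == n) = false := beq_eq_false_iff_ne.mpr (Ne.symm h1)
  have b2 : (("lead":String) == n) = false := beq_eq_false_iff_ne.mpr (Ne.symm h2)
  have b3 : (("led":String) == n) = false := beq_eq_false_iff_ne.mpr (Ne.symm h3)
  have b4 : (("mentor":String) == n) = false := beq_eq_false_iff_ne.mpr (Ne.symm h4)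
  have b5 : (("founder":String) == n) = false := beq_eq_false_iff_ne.mpr (Ne.symm h5)
  have b6 : (("prototype":String) == n) = false := beq_eq_false_iff_ne.mpr (Ne.symm h6)
  have b7 : (("engineer":String) == n) = false := beq_eq_false_iff_ne.mpr (Ne.symm h7)
  have b8 : (("product":String) == n) = false := beq_eq_false_iff_ne.mpr (Ne.symm h8)
  simp [pvGroups, List.foldl, e1, e2, e3, e4, e5, e6, PySem.Set.contains, PySem.Dict.getD,
        PySem.Dict.get?, pvIndexLit, PySem.Set.union, PySem.Set.update, PySem.Set.add,
        PySem.Set.ofList, List.find?, h1, h2, h3, h4, h5, h6, h7, h8,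
        b1, b2, b3, b4, b5, b6, b7, b8]

-- ===== VERDICT (by name: the statement is the Claim_ definition above) =====
theorem term_variants_spec : Claim_equal_term_variants := by
  intro term _
  unfold Spec_term_variants term_variants term_variants_alt
  rw [pvNormalize_eq]
  exact pv_core_eq (normalizeTermA term)
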